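-- pv_equiv track=rewrite | github.com/DouglasRao/Hadouking | utils/commands.py | normalize_command_input
-- ===== SOURCE A (Python) =====
-- COMMAND_ALIASES = {
--     "/h": "/help",
--     "/a": "/agent",
--     "/sa": "/single_agent",
--     "/ma": "/multi_agent",
--     "/mas": "/multi_agents",
--     "/mutli_agents": "/multi_agents",
--     "/t": "/task",
--     "/p": "/peer",
--     "/m": "/mcp",
--     "/as": "/auth status",
--     "/mo": "/model",
-- }
--
-- def normalize_command_input(user_input: str) -> str:
--     stripped = (user_input or "").strip()
--     if not stripped.startswith("/"):
--         return stripped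
--
--     for alias, expanded in sorted(COMMAND_ALIASES.items(), key=lambda item: len(item[0]), reverse=True):
--         if stripped == alias:
--             return expanded
--         if stripped.startswith(alias + " "):
--             return expanded + stripped[len(alias):]
--     return stripped
-- ===== SOURCE B (Python) =====
-- COMMAND_ALIASES = {
--     "/h": "/help",
--     "/a": "/agent",
--     "/sa": "/single_agent",
--     "/ma": "/multi_agent",
--     "/mas": "/multi_agents",
--     "/mutli_agents": "/multi_agents",
--     "/t": "/task",
--     "/p": "/peer",
--     "/m": "/mcp",
--     "/as": "/auth status",
--     "/mo": "/model",
-- }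
--
-- def normalize_command_input(user_input: str) -> str:
--     stripped = (user_input or "").strip()
--     if not stripped.startswith("/"):
--         return stripped
--     i = stripped.find(' ')
--     token = stripped if i == -1 else stripped[:i]
--     expanded = COMMAND_ALIASES.get(token)
--     if expanded is None:
--         return stripped
--     return expanded + stripped[len(token):]
-- ===== Notes on version B (the rewrite author's own statement) =====
-- stated objective: idiomatic
-- what changed: Replaces the sorted scan over all aliases (sort by key length + per-alias equality/prefix tests) by computing the first space-delimited token once and doing a single dict lookup on it.
import Mathlib
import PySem

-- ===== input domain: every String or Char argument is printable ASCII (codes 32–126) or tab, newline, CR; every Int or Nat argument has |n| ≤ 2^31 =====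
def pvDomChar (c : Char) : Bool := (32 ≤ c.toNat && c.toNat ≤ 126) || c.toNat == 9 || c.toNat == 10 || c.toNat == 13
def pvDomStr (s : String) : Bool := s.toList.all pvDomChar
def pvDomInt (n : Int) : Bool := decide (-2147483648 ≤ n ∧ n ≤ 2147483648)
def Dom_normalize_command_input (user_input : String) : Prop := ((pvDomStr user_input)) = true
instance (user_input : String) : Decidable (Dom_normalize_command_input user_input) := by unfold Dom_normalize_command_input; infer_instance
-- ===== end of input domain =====

-- B replaces A's sorted scan over all aliases by one first-token computation plus a single dict lookup (objective: idiomatic).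


-- shared module-level constant COMMAND_ALIASES (dict → PySem.Dict, insertion order); both ports work on List Char via PySem.Chars, String.ofList at the boundary
def COMMAND_ALIASES : PySem.Dict (List Char) (List Char) :=
  PySem.Dict.ofList
    [("/h".toList, "/help".toList), ("/a".toList, "/agent".toList),
     ("/sa".toList, "/single_agent".toList), ("/ma".toList, "/multi_agent".toList),
     ("/mas".toList, "/multi_agents".toList), ("/mutli_agents".toList, "/multi_agents".toList),
     ("/t".toList, "/task".toList), ("/p".toList, "/peer".toList), ("/m".toList, "/mcp".toList),
     ("/as".toList, "/auth status".toList), ("/mo".toList, "/model".toList)]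

-- ===== PORT A =====
-- A's for-loop over the sorted alias items (early return = structural recursion); stripped[len(alias):] = PySem.List.slice
def pvLoopA (stripped : List Char) : List (List Char × List Char) → List Char
  | [] => stripped
  | (al, ex) :: rest =>
    if stripped = al then ex
    else if PySem.Chars.startswith stripped (al ++ [' ']) then
      ex ++ PySem.List.slice stripped (some (al.length : Int)) none
    else pvLoopA stripped rest

def normalize_command_input (user_input : String) : String :=
  -- (user_input or "").strip(): '' is the only falsy str, so `or ""` is the identity written out
  let stripped := PySem.Chars.strip (if user_input.toList = [] then [] else user_input.toList)
  if PySem.Chars.startswith stripped ['/'] = false then String.ofList stripped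
  else String.ofList (pvLoopA stripped
    (PySem.List.sorted COMMAND_ALIASES.items (fun item => item.1.length) true))

-- ===== PORT B =====
def normalize_command_input_alt (user_input : String) : String :=
  let stripped := PySem.Chars.strip (if user_input.toList = [] then [] else user_input.toList)
  if PySem.Chars.startswith stripped ['/'] = false then String.ofList stripped
  else
    let i := PySem.Chars.find stripped [' ']
    let token := if i = -1 then stripped else PySem.List.slice stripped none (some i)
    match COMMAND_ALIASES.get? token with
    | none => String.ofList stripped
    | some expanded =>
      String.ofList (expanded ++ PySem.List.slice stripped (some (token.length : Int)) none)

-- ===== PRECONDITION & SPEC =====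
def Spec_normalize_command_input (user_input : String) (out : String) : Prop := out = normalize_command_input_alt user_input
instance (user_input : String) (out : String) : Decidable (Spec_normalize_command_input user_input out) := by unfold Spec_normalize_command_input; infer_instance

-- ===== CLAIM (what is proved, stated in full; the proofs are below) =====
def Claim_equal_normalize_command_input : Prop := ∀ (user_input : String), Dom_normalize_command_input user_input → Spec_normalize_command_input user_input (normalize_command_input user_input)

-- ===== LEMMAS AND PROOFS =====

-- the Boolean token predicate used throughout
def pvTokP (c : Char) : Bool := c != ' '

lemma pv_singleton_prefix {l : List Char} {c : Char} : [c] <+: l ↔ l.head? = some c := by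
  constructor
  · rintro ⟨t, rfl⟩; rfl
  · intro h
    cases l with
    | nil => simp at h
    | cons a t => simp at h; exact ⟨t, by simp [h]⟩

-- B's token computation IS takeWhile (≠ ' ')
lemma pv_take_eq_takeWhile (s : List Char) (n : Nat)
    (hcur : s[n]? = some ' ') (hbefore : ∀ i, i < n → s[i]? ≠ some ' ') :
    s.take n = s.takeWhile pvTokP := by
  induction s generalizing n with
  | nil => simp at hcur
  | cons a t ih =>
    cases n with
    | zero =>
      rw [List.getElem?_cons_zero, Option.some_inj] at hcur
      simp [pvTokP, hcur]
    | succ m =>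
      have ha : pvTokP a = true := by
        have h0 := hbefore 0 (Nat.succ_pos m)
        rw [List.getElem?_cons_zero] at h0
        simpa [pvTokP] using fun e => h0 (by rw [e])
      rw [List.getElem?_cons_succ] at hcur
      simp only [List.take_succ_cons, List.takeWhile_cons, ha, if_true, List.cons.injEq, true_and]
      exact ih m hcur (fun i hi hc => hbefore (i + 1) (by omega) (by simpa using hc))

lemma pv_token_eq (s : List Char) :
    (if PySem.Chars.find s [' '] = -1 then s
     else PySem.List.slice s none (some (PySem.Chars.find s [' ']))) = s.takeWhile pvTokP := by
  by_cases h : PySem.Chars.find s [' '] = -1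
  · simp only [h, if_true]
    have hns : ¬ [' '] <:+: s := (PySem.Chars.find_eq_neg_one_iff s [' ']).mp h
    have hall : ∀ a ∈ s, pvTokP a = true := by
      intro a ha
      by_contra hc
      have haa : a = ' ' := by simpa [pvTokP] using hc
      exact hns ((List.singleton_infix_iff ' ' s).mpr (haa ▸ ha))
    exact (List.takeWhile_eq_self_iff.mpr hall).symm
  · have hpos : 0 ≤ PySem.Chars.find s [' '] := by
      have := PySem.Chars.neg_one_le_find s [' ']
      omega
    rw [if_neg h, PySem.List.slice_to _ hpos]
    obtain ⟨hpre, hmin⟩ := PySem.Chars.find_spec (s := s) (sub := [' ']) hpos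
    refine pv_take_eq_takeWhile s _ ?_ ?_
    · rw [← List.head?_drop]; exact pv_singleton_prefix.mp hpre
    · intro i hi hc
      exact hmin i hi (pv_singleton_prefix.mpr (by rw [List.head?_drop]; exact hc))

-- a space-free alias matches A's tests iff it IS the first token
lemma pv_match_iff (s a : List Char) (ha : ∀ c ∈ a, pvTokP c = true) :
    (s = a ∨ PySem.Chars.startswith s (a ++ [' ']) = true) ↔ s.takeWhile pvTokP = a := by
  rw [PySem.Chars.startswith_iff]
  constructor
  · rintro (rfl | ⟨t, rfl⟩)
    · exact List.takeWhile_eq_self_iff.mpr ha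
    · rw [List.append_assoc, List.takeWhile_append_of_pos ha]
      simp [pvTokP]
  · intro ht
    have hsplit := List.takeWhile_append_dropWhile (p := pvTokP) (l := s)
    rw [ht] at hsplit
    cases hd : s.dropWhile pvTokP with
    | nil => left; rw [← hsplit, hd, List.append_nil]
    | cons c t =>
      right
      have hc : pvTokP c = false := by
        have := List.head_dropWhile_not pvTokP (l := s) (by simp [hd])
        simpa [hd] using this
      have hc' : c = ' ' := by simpa [pvTokP] using hc
      exact ⟨t, by rw [← hsplit, hd, hc']; simp⟩

-- after a match, A's tail slice is dropWhile
lemma pv_drop_eq (s a : List Char) (ht : s.takeWhile pvTokP = a) :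
    s.drop a.length = s.dropWhile pvTokP := by
  conv_lhs => rw [← List.takeWhile_append_dropWhile (p := pvTokP) (l := s), ht]
  exact List.drop_left
-- A's loop = first-match lookup of the token in the scanned list
lemma pv_loopA_eq (s : List Char) (l : List (List Char × List Char))
    (hl : ∀ p ∈ l, ∀ c ∈ p.1, pvTokP c = true) :
    pvLoopA s l = match l.find? (fun p => p.1 == s.takeWhile pvTokP) with
      | some (_, ex) => ex ++ s.dropWhile pvTokP
      | none => s := by
  induction l with
  | nil => rfl
  | cons hd tl ih =>
    obtain ⟨al, ex⟩ := hd
    have hal : ∀ c ∈ al, pvTokP c = true := hl (al, ex) (List.mem_cons_self ..)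
    by_cases hm : s.takeWhile pvTokP = al
    · simp only [List.find?_cons, show (al == s.takeWhile pvTokP) = true by simp [hm]]
      by_cases hs : s = al
      · have hdw : s.dropWhile pvTokP = [] := by
          have h2 := List.takeWhile_append_dropWhile (p := pvTokP) (l := s)
          rw [hm] at h2
          exact List.append_cancel_left (as := al) (by rw [h2, List.append_nil, hs])
        simp only [pvLoopA, if_pos hs, hdw, List.append_nil]
      · have hsw : PySem.Chars.startswith s (al ++ [' ']) = true :=
          ((pv_match_iff s al hal).mpr hm).resolve_left hs
        simp only [pvLoopA, if_neg hs, if_pos hsw]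
        rw [PySem.List.slice_from_natCast, pv_drop_eq s al hm]
    · have hns : s ≠ al := fun hs => hm ((pv_match_iff s al hal).mp (Or.inl hs))
      have hnw : PySem.Chars.startswith s (al ++ [' ']) ≠ true := fun hw =>
        hm ((pv_match_iff s al hal).mp (Or.inr hw))
      simp only [pvLoopA, if_neg hns, if_neg hnw]
      rw [ih (fun p hp => hl p (List.mem_cons_of_mem _ hp))]
      simp only [List.find?_cons,
        show (al == s.takeWhile pvTokP) = false by
          rw [beq_eq_false_iff_ne]; exact fun h => hm h.symm]

-- the concrete sorted alias list (stable length-descending order)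
lemma pv_sorted_lit :
    PySem.List.sorted COMMAND_ALIASES.items (fun item => item.1.length) true
      = [("/mutli_agents".toList, "/multi_agents".toList), ("/mas".toList, "/multi_agents".toList),
         ("/sa".toList, "/single_agent".toList), ("/ma".toList, "/multi_agent".toList),
         ("/as".toList, "/auth status".toList), ("/mo".toList, "/model".toList),
         ("/h".toList, "/help".toList), ("/a".toList, "/agent".toList),
         ("/t".toList, "/task".toList), ("/p".toList, "/peer".toList),
         ("/m".toList, "/mcp".toList)] := by decide

-- first match in the sorted list = first match in insertion order (keys are distinct)
lemma pv_lookup_agree (t : List Char) :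
    (PySem.List.sorted COMMAND_ALIASES.items (fun item => item.1.length) true).find?
        (fun p => p.1 == t)
      = COMMAND_ALIASES.items.find? (fun p => p.1 == t) := by
  rw [pv_sorted_lit]
  by_cases h1 : t = "/h".toList; · subst h1; decide
  by_cases h2 : t = "/a".toList; · subst h2; decide
  by_cases h3 : t = "/sa".toList; · subst h3; decide
  by_cases h4 : t = "/ma".toList; · subst h4; decide
  by_cases h5 : t = "/mas".toList; · subst h5; decide
  by_cases h6 : t = "/mutli_agents".toList; · subst h6; decide
  by_cases h7 : t = "/t".toList; · subst h7; decide
  by_cases h8 : t = "/p".toList; · subst h8; decide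
  by_cases h9 : t = "/m".toList; · subst h9; decide
  by_cases h10 : t = "/as".toList; · subst h10; decide
  by_cases h11 : t = "/mo".toList; · subst h11; decide
  rw [List.find?_eq_none.mpr, List.find?_eq_none.mpr] <;>
  · intro p hp
    simp only [COMMAND_ALIASES, PySem.Dict.ofList] at hp ⊢
    fin_cases hp <;> simp [beq_iff_eq] <;>
    first
      | exact Ne.symm h1 | exact Ne.symm h2 | exact Ne.symm h3 | exact Ne.symm h4
      | exact Ne.symm h5 | exact Ne.symm h6 | exact Ne.symm h7 | exact Ne.symm h8
      | exact Ne.symm h9 | exact Ne.symm h10 | exact Ne.symm h11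

set_option maxRecDepth 8192 in
-- ===== VERDICT (by name: the statement is the Claim_ definition above) =====
theorem normalize_command_input_spec : Claim_equal_normalize_command_input := by
  intro user_input _
  unfold Spec_normalize_command_input normalize_command_input normalize_command_input_alt
  set s := PySem.Chars.strip (if user_input.toList = [] then [] else user_input.toList) with hs
  by_cases hsw : PySem.Chars.startswith s ['/'] = false
  · simp [hsw]
  · simp only [if_neg hsw]
    have hns : ∀ p ∈ PySem.List.sorted COMMAND_ALIASES.items (fun item => item.1.length) true,
        ∀ c ∈ p.1, pvTokP c = true := by rw [pv_sorted_lit]; simp [pvTokP]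
    rw [pv_loopA_eq s _ hns, pv_lookup_agree, pv_token_eq s]
    unfold PySem.Dict.get?
    cases hf : COMMAND_ALIASES.items.find? (fun p => p.1 == s.takeWhile pvTokP) with
    | none => simp
    | some pr =>
      obtain ⟨al, ex⟩ := pr
      have hal : al = s.takeWhile pvTokP := by
        have := List.find?_some hf
        simpa [beq_iff_eq] using this
      simp only [Option.map_some]
      rw [PySem.List.slice_from_natCast, ← hal, pv_drop_eq s al hal.symm]
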